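-- pv_equiv track=rewrite | github.com/jackattack16/Courserr | update_class_data.py | get_subject_from_class_name
-- ===== SOURCE A (Python) =====
-- def get_subject_from_class_name(class_name, description):
--     """Determine subject area from class name and description."""
--     class_name_lower = class_name.lower()
--     description_lower = description.lower()
--
--     if any(word in class_name_lower for word in ['agriculture', 'agri', 'animal', 'plant', 'food', 'natural']):
--         return 'Agriculture'
--     elif any(word in class_name_lower for word in ['carpentry', 'wood', 'welding', 'manufacturing', 'cad', 'drafting']):
--         return 'CTE'
--     elif any(word in class_name_lower for word in ['art', 'drawing', 'painting', 'ceramics', 'photography', 'graphic']):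
--         return 'Art'
--     elif any(word in class_name_lower for word in ['business', 'marketing', 'accounting', 'entrepreneurship', 'finance']):
--         return 'Business'
--     elif any(word in class_name_lower for word in ['english', 'literature', 'writing', 'journalism', 'speech']):
--         return 'English'
--     elif any(word in class_name_lower for word in ['algebra', 'geometry', 'calculus', 'statistics', 'math']):
--         return 'Math'
--     elif any(word in class_name_lower for word in ['biology', 'chemistry', 'physics', 'science']):
--         return 'Science'
--     elif any(word in class_name_lower for word in ['history', 'government', 'psychology', 'sociology', 'economics']):
--         return 'History'
--     elif any(word in class_name_lower for word in ['band', 'choir', 'orchestra', 'music']):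
--         return 'Music'
--     elif any(word in class_name_lower for word in ['pe', 'physical', 'weights', 'sports', 'fitness']):
--         return 'PE'
--     elif any(word in class_name_lower for word in ['spanish', 'french', 'german', 'language']):
--         return 'World Languages'
--     else:
--         return 'General'
-- ===== SOURCE B (Python) =====
-- _SUBJECT_TABLE = [
--     ('Agriculture', ['agriculture', 'agri', 'animal', 'plant', 'food', 'natural']),
--     ('CTE', ['carpentry', 'wood', 'welding', 'manufacturing', 'cad', 'drafting']),
--     ('Art', ['art', 'drawing', 'painting', 'ceramics', 'photography', 'graphic']),
--     ('Business', ['business', 'marketing', 'accounting', 'entrepreneurship', 'finance']),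
--     ('English', ['english', 'literature', 'writing', 'journalism', 'speech']),
--     ('Math', ['algebra', 'geometry', 'calculus', 'statistics', 'math']),
--     ('Science', ['biology', 'chemistry', 'physics', 'science']),
--     ('History', ['history', 'government', 'psychology', 'sociology', 'economics']),
--     ('Music', ['band', 'choir', 'orchestra', 'music']),
--     ('PE', ['pe', 'physical', 'weights', 'sports', 'fitness']),
--     ('World Languages', ['spanish', 'french', 'german', 'language']),
-- ]
--
-- # Inverted index: keyword -> (priority rank, subject), ranks follow table order.
-- _KEYWORD_INDEX = {}
-- for _subject, _kws in _SUBJECT_TABLE: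
--     for _kw in _kws:
--         _KEYWORD_INDEX[_kw] = (len(_KEYWORD_INDEX), _subject)
-- _MAX_KW = max(len(k) for k in _KEYWORD_INDEX)
--
--
-- def get_subject_from_class_name(class_name, description):
--     """Determine subject area: hash-lookup every short substring of the
--     lowered class name in an inverted keyword index; lowest rank wins."""
--     s = class_name.lower()
--     n = len(s)
--     best = None
--     for i in range(n):
--         for length in range(1, _MAX_KW + 1):
--             hit = _KEYWORD_INDEX.get(s[i:i + length])
--             if hit is not None and (best is None or hit[0] < best[0]):
--                 best = hit
--     return best[1] if best is not None else 'General'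
-- ===== Notes on version B (the rewrite author's own statement) =====
-- stated objective: alternative
-- what changed: Instead of searching the name for each of the 55 keywords branch by branch, B enumerates every substring of the lowered name up to the longest keyword length and hash-looks it up in a precomputed keyword->(rank, subject) inverted index, returning the subject of the lowest-ranked hit (ranks encode the if/elif precedence).
import Mathlib
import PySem

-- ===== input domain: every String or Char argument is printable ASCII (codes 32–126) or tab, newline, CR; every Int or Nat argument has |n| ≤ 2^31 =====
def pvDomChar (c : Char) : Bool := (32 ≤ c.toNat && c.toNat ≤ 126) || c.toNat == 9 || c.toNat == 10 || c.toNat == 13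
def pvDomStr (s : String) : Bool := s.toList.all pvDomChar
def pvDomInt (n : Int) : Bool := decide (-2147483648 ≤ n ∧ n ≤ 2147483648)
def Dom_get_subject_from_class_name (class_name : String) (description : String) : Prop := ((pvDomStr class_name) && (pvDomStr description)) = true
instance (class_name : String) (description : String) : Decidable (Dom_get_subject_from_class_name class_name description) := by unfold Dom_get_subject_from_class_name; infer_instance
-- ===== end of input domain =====

-- B replaces the per-keyword substring searches of A's if/elif chain by a different algorithm:
-- it hash-looks up every substring (up to the longest keyword length) of the lowered name in a
-- precomputed keyword -> (rank, subject) inverted index and returns the lowest-ranked hit's subject.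
set_option maxRecDepth 16000
set_option maxHeartbeats 2000000


-- ===== PORT A =====
def get_subject_from_class_name (class_name : String) (description : String) : String :=
  let class_name_lower := PySem.Str.lower class_name
  let _description_lower := PySem.Str.lower description
  if (["agriculture", "agri", "animal", "plant", "food", "natural"].any (fun word => PySem.Str.isIn word class_name_lower)) then "Agriculture"
  else if (["carpentry", "wood", "welding", "manufacturing", "cad", "drafting"].any (fun word => PySem.Str.isIn word class_name_lower)) then "CTE"
  else if (["art", "drawing", "painting", "ceramics", "photography", "graphic"].any (fun word => PySem.Str.isIn word class_name_lower)) then "Art"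
  else if (["business", "marketing", "accounting", "entrepreneurship", "finance"].any (fun word => PySem.Str.isIn word class_name_lower)) then "Business"
  else if (["english", "literature", "writing", "journalism", "speech"].any (fun word => PySem.Str.isIn word class_name_lower)) then "English"
  else if (["algebra", "geometry", "calculus", "statistics", "math"].any (fun word => PySem.Str.isIn word class_name_lower)) then "Math"
  else if (["biology", "chemistry", "physics", "science"].any (fun word => PySem.Str.isIn word class_name_lower)) then "Science"
  else if (["history", "government", "psychology", "sociology", "economics"].any (fun word => PySem.Str.isIn word class_name_lower)) then "History"
  else if (["band", "choir", "orchestra", "music"].any (fun word => PySem.Str.isIn word class_name_lower)) then "Music"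
  else if (["pe", "physical", "weights", "sports", "fitness"].any (fun word => PySem.Str.isIn word class_name_lower)) then "PE"
  else if (["spanish", "french", "german", "language"].any (fun word => PySem.Str.isIn word class_name_lower)) then "World Languages"
  else "General"

-- ===== PORT B =====
-- B-side data: the subject table, the inverted keyword index and the longest keyword length.
def pvSubjectTable : List (String × List String) :=
  [("Agriculture", ["agriculture", "agri", "animal", "plant", "food", "natural"]),
   ("CTE", ["carpentry", "wood", "welding", "manufacturing", "cad", "drafting"]),
   ("Art", ["art", "drawing", "painting", "ceramics", "photography", "graphic"]),
   ("Business", ["business", "marketing", "accounting", "entrepreneurship", "finance"]),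
   ("English", ["english", "literature", "writing", "journalism", "speech"]),
   ("Math", ["algebra", "geometry", "calculus", "statistics", "math"]),
   ("Science", ["biology", "chemistry", "physics", "science"]),
   ("History", ["history", "government", "psychology", "sociology", "economics"]),
   ("Music", ["band", "choir", "orchestra", "music"]),
   ("PE", ["pe", "physical", "weights", "sports", "fitness"]),
   ("World Languages", ["spanish", "french", "german", "language"])]

def pvKeywordIndex : PySem.Dict String (Int × String) :=
  pvSubjectTable.foldl
    (fun d row => row.2.foldl (fun d kw => d.insert kw ((d.size : Int), row.1)) d)
    PySem.Dict.empty

def pvMaxKw : Int :=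
  (PySem.List.max? (pvKeywordIndex.keys.map (fun k => PySem.Str.len k)) (fun x => x)).getD 0

def get_subject_from_class_name_alt (class_name : String) (_description : String) : String :=
  let s := PySem.Str.lower class_name
  let n : Int := PySem.Str.len s
  let best :=
    (PySem.List.pyRange 0 n 1).foldl (fun best i =>
      (PySem.List.pyRange 1 (pvMaxKw + 1) 1).foldl (fun best length =>
        match pvKeywordIndex.get? (PySem.Str.slice s (some i) (some (i + length))) with
        | none => best
        | some hit =>
          match best with
          | none => some hit
          | some b => if hit.1 < b.1 then some hit else best)
        best)
      (none : Option (Int × String))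
  match best with
  | some b => b.2
  | none => "General"

-- ===== PRECONDITION & SPEC =====
def Spec_get_subject_from_class_name (class_name : String) (description : String) (out : String) : Prop := out = get_subject_from_class_name_alt class_name description
instance (class_name : String) (description : String) (out : String) : Decidable (Spec_get_subject_from_class_name class_name description out) := by unfold Spec_get_subject_from_class_name; infer_instance

-- ===== CLAIM (what is proved, stated in full; the proofs are below) =====
def Claim_equal_get_subject_from_class_name : Prop := ∀ (class_name : String) (description : String), Dom_get_subject_from_class_name class_name description → Spec_get_subject_from_class_name class_name description (get_subject_from_class_name class_name description)

-- ===== LEMMAS AND PROOFS =====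

-- Proof-side views of B's loop.
def pvKeep (b : Option (Int × String)) (h : Int × String) : Option (Int × String) :=
  match b with
  | none => some h
  | some b' => if h.1 < b'.1 then some h else b

def pvSubs (s : String) : List String :=
  (PySem.List.pyRange 0 (PySem.Str.len s) 1).flatMap (fun i =>
    (PySem.List.pyRange 1 (pvMaxKw + 1) 1).map (fun length =>
      PySem.Str.slice s (some i) (some (i + length))))

def pvHits (s : String) : List (Int × String) :=
  (pvSubs s).filterMap (fun sub => pvKeywordIndex.get? sub)

def pvBest (s : String) : Option (Int × String) := (pvHits s).foldl pvKeep none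

def pvOut (s : String) : String :=
  match pvBest s with
  | some b => b.2
  | none => "General"

-- Glue for B's loop shape: its step matches `none` before `some`, so Mathlib's
-- List.foldl_filterMap (opposite arm order) does not rewrite it syntactically.
lemma pv_foldl_match_filterMap {α β γ : Type} (L : List α) (g : α → Option β)
    (f : γ → β → γ) (b : γ) :
    L.foldl (fun b x => match g x with | none => b | some y => f b y) b
      = (L.filterMap g).foldl f b := by
  induction L generalizing b with
  | nil => rfl
  | cons x t ih =>
    simp only [List.foldl_cons, List.filterMap_cons]
    cases hx : g x <;> simp [ih]

lemma pv_alt_eq (class_name description : String) :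
    get_subject_from_class_name_alt class_name description = pvOut (PySem.Str.lower class_name) := by
  unfold get_subject_from_class_name_alt pvOut pvBest pvHits pvSubs
  rw [← pv_foldl_match_filterMap, List.foldl_flatMap]
  simp only [List.foldl_map]
  congr 1
  refine List.foldl_ext _ _ _ ?_
  intro acc i _
  refine List.foldl_ext _ _ _ ?_
  intro b len _
  cases pvKeywordIndex.get? (PySem.Str.slice (PySem.Str.lower class_name) (some i) (some (i + len))) with
  | none => rfl
  | some hit => cases b <;> rfl

-- The minimum-keeping fold: result is a member attaining the minimum rank.
lemma pvKeep_foldl_some (L : List (Int × String)) (x : Int × String) :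
    ∃ y, L.foldl pvKeep (some x) = some y ∧ (y = x ∨ y ∈ L) ∧ y.1 ≤ x.1 ∧ ∀ h ∈ L, y.1 ≤ h.1 := by
  induction L generalizing x with
  | nil => exact ⟨x, rfl, Or.inl rfl, le_refl _, by simp⟩
  | cons h t ih =>
    simp only [List.foldl_cons]
    by_cases hlt : h.1 < x.1
    · obtain ⟨y, hy, hmem, hle, hall⟩ := ih h
      refine ⟨y, by simpa [pvKeep, hlt] using hy, ?_, by omega, ?_⟩
      · rcases hmem with rfl | hm
        · exact Or.inr (List.mem_cons_self)
        · exact Or.inr (List.mem_cons_of_mem _ hm)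
      · intro z hz
        rcases List.mem_cons.mp hz with rfl | hz'
        · omega
        · exact hall z hz'
    · obtain ⟨y, hy, hmem, hle, hall⟩ := ih x
      refine ⟨y, by simpa [pvKeep, hlt] using hy, ?_, hle, ?_⟩
      · rcases hmem with rfl | hm
        · exact Or.inl rfl
        · exact Or.inr (List.mem_cons_of_mem _ hm)
      · intro z hz
        rcases List.mem_cons.mp hz with rfl | hz'
        · omega
        · exact hall z hz'

lemma pvBest_spec (s : String) (hne : pvHits s ≠ []) :
    ∃ y, pvBest s = some y ∧ y ∈ pvHits s ∧ ∀ h ∈ pvHits s, y.1 ≤ h.1 := by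
  unfold pvBest
  cases hh : pvHits s with
  | nil => exact absurd hh hne
  | cons h t =>
    obtain ⟨y, hy, hmem, hle, hall⟩ := pvKeep_foldl_some t h
    refine ⟨y, by simpa [pvKeep] using hy, ?_, ?_⟩
    · rcases hmem with rfl | hm
      · exact List.mem_cons_self
      · exact List.mem_cons_of_mem _ hm
    · intro z hz
      rcases List.mem_cons.mp hz with rfl | hz'
      · exact hle
      · exact hall z hz'

-- Table facts established once by computation.
lemma pv_lookup : ∀ e ∈ pvKeywordIndex.items, pvKeywordIndex.get? e.1 = some e.2 := by decide

lemma pv_kwlen : ∀ e ∈ pvKeywordIndex.items,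
    1 ≤ (e.1.toList.length : Int) ∧ (e.1.toList.length : Int) ≤ pvMaxKw := by decide

-- Membership in B's hit list = a keyword of the index occurring in s.
lemma pv_mem_hits_iff (s : String) (h : Int × String) :
    h ∈ pvHits s ↔ ∃ kw, (kw, h) ∈ pvKeywordIndex.items ∧ PySem.Str.isIn kw s = true := by
  constructor
  · intro hh
    obtain ⟨sub, hsub, hget⟩ := List.mem_filterMap.mp hh
    refine ⟨sub, PySem.Dict.mem_items_of_get?_eq_some _ hget, ?_⟩
    obtain ⟨i, hi, hsub2⟩ := List.mem_flatMap.mp hsub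
    obtain ⟨len, hlen, rfl⟩ := List.mem_map.mp hsub2
    rw [PySem.List.mem_pyRange_one] at hi hlen
    rw [PySem.Str.isIn_iff_infix, PySem.Str.toList_slice, PySem.Chars.slice_eq_listSlice,
      PySem.List.slice_toNat (a := i) (b := i + len) s.toList (by omega) (by omega)]
    exact ((s.toList.drop _).take_prefix _).isInfix.trans (s.toList.drop_suffix _).isInfix
  · rintro ⟨kw, hmem, hin⟩
    have hin' : PySem.Chars.isIn kw.toList s.toList = true := by simpa using hin
    obtain ⟨j, hj⟩ := (PySem.Chars.exists_prefix_drop_iff_isIn kw.toList s.toList).mpr hin'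
    have hlen : 1 ≤ (kw.toList.length : Int) ∧ (kw.toList.length : Int) ≤ pvMaxKw :=
      pv_kwlen (kw, h) hmem
    have hjlt : j < s.toList.length := by
      have h1 := hj.length_le
      have h2 : 1 ≤ kw.toList.length := by exact_mod_cast hlen.1
      simp only [List.length_drop] at h1
      omega
    refine List.mem_filterMap.mpr ⟨kw, ?_, pv_lookup (kw, h) hmem⟩
    refine List.mem_flatMap.mpr ⟨(j : Int), ?_, ?_⟩
    · rw [PySem.List.mem_pyRange_one]
      constructor
      · omega
      · simp only [PySem.Str.len_eq]
        exact_mod_cast hjlt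
    · refine List.mem_map.mpr ⟨(kw.toList.length : Int), ?_, ?_⟩
      · rw [PySem.List.mem_pyRange_one]
        constructor
        · exact_mod_cast hlen.1
        · have := hlen.2; omega
      · apply String.toList_inj.mp
        rw [PySem.Str.toList_slice, PySem.Chars.slice_eq_listSlice, PySem.List.slice_natCast_add]
        exact (List.prefix_iff_eq_take.mp hj).symm

-- Generic branch lemma: if no keyword of rank < lo occurs, some keyword of rank in [lo,hi)
-- occurs, and all keywords of rank in [lo,hi) carry subject subj, then B outputs subj.
lemma pvG (s : String) (lo hi : Int) (subj : String) (lw : List String)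
    (hcover : ∀ e ∈ pvKeywordIndex.items, e.2.1 < lo → e.1 ∈ lw)
    (hlow : (lw.any fun w => PySem.Str.isIn w s) = false)
    (hrow : ∃ kw r subj', (kw, r, subj') ∈ pvKeywordIndex.items ∧ lo ≤ r ∧ r < hi ∧ PySem.Str.isIn kw s = true)
    (hsubj : ∀ e ∈ pvKeywordIndex.items, lo ≤ e.2.1 → e.2.1 < hi → e.2.2 = subj) :
    pvOut s = subj := by
  obtain ⟨kw, r, subj', hmem, hlo, hhi, hin⟩ := hrow
  have hhit : (r, subj') ∈ pvHits s := (pv_mem_hits_iff s _).mpr ⟨kw, hmem, hin⟩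
  have hne : pvHits s ≠ [] := fun hn => by simp [hn] at hhit
  obtain ⟨y, hy, hymem, hymin⟩ := pvBest_spec s hne
  obtain ⟨kw', hkw', hin'⟩ := (pv_mem_hits_iff s y).mp hymem
  have hylo : lo ≤ y.1 := by
    by_contra hc
    have := hcover (kw', y) hkw' (show y.1 < lo by omega)
    rcases List.any_eq_false.mp hlow kw' this hin'
  have hyhi : y.1 < hi := lt_of_le_of_lt (hymin _ hhit) hhi
  have := hsubj (kw', y) hkw' hylo hyhi
  simp only [pvOut, hy]
  exact this

lemma pvGnone (s : String) (lw : List String)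
    (hcover : ∀ e ∈ pvKeywordIndex.items, e.1 ∈ lw)
    (hlow : (lw.any fun w => PySem.Str.isIn w s) = false) :
    pvOut s = "General" := by
  have hnil : pvHits s = [] := by
    rw [List.eq_nil_iff_forall_not_mem]
    intro h hh
    obtain ⟨kw, hmem, hin⟩ := (pv_mem_hits_iff s h).mp hh
    rcases List.any_eq_false.mp hlow kw (hcover _ hmem) hin
  simp [pvOut, pvBest, hnil]

lemma pv_row_any {s : String} {row : List String} {lo hi : Int}
    (h : (row.any fun w => PySem.Str.isIn w s) = true)
    (hf : ∀ w ∈ row, ∃ e ∈ pvKeywordIndex.items, e.1 = w ∧ lo ≤ e.2.1 ∧ e.2.1 < hi) :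
    ∃ kw r subj', (kw, r, subj') ∈ pvKeywordIndex.items ∧ lo ≤ r ∧ r < hi ∧ PySem.Str.isIn kw s = true := by
  obtain ⟨w, hw, hin⟩ := List.any_eq_true.mp h
  obtain ⟨e, he, hew, hlo, hhi⟩ := hf w hw
  exact ⟨e.1, e.2.1, e.2.2, by simpa using he, hlo, hhi, by rwa [hew]⟩

-- ===== VERDICT (by name: the statement is the Claim_ definition above) =====
theorem get_subject_from_class_name_spec : Claim_equal_get_subject_from_class_name := by
  intro class_name description _
  unfold Spec_get_subject_from_class_name
  rw [pv_alt_eq]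
  simp only [get_subject_from_class_name]
  by_cases h1 : (["agriculture", "agri", "animal", "plant", "food", "natural"].any fun word => PySem.Str.isIn word (PySem.Str.lower class_name)) = true
  · simp only [h1, if_true]
    exact (pvG (PySem.Str.lower class_name) 0 6 "Agriculture"
      ([])
      (by decide) (by simp)
      (pv_row_any h1 (by decide)) (by decide)).symm
  simp only [Bool.not_eq_true] at h1
  simp only [h1, Bool.false_eq_true, if_false]
  by_cases h2 : (["carpentry", "wood", "welding", "manufacturing", "cad", "drafting"].any fun word => PySem.Str.isIn word (PySem.Str.lower class_name)) = true
  · simp only [h2, if_true]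
    exact (pvG (PySem.Str.lower class_name) 6 12 "CTE"
      (["agriculture", "agri", "animal", "plant", "food", "natural"])
      (by decide) h1
      (pv_row_any h2 (by decide)) (by decide)).symm
  simp only [Bool.not_eq_true] at h2
  simp only [h2, Bool.false_eq_true, if_false]
  by_cases h3 : (["art", "drawing", "painting", "ceramics", "photography", "graphic"].any fun word => PySem.Str.isIn word (PySem.Str.lower class_name)) = true
  · simp only [h3, if_true]
    exact (pvG (PySem.Str.lower class_name) 12 18 "Art"
      (["agriculture", "agri", "animal", "plant", "food", "natural"] ++ ["carpentry", "wood", "welding", "manufacturing", "cad", "drafting"])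
      (by decide) (by simp only [List.any_append, h1, h2, Bool.or_self])
      (pv_row_any h3 (by decide)) (by decide)).symm
  simp only [Bool.not_eq_true] at h3
  simp only [h3, Bool.false_eq_true, if_false]
  by_cases h4 : (["business", "marketing", "accounting", "entrepreneurship", "finance"].any fun word => PySem.Str.isIn word (PySem.Str.lower class_name)) = true
  · simp only [h4, if_true]
    exact (pvG (PySem.Str.lower class_name) 18 23 "Business"
      (["agriculture", "agri", "animal", "plant", "food", "natural"] ++ ["carpentry", "wood", "welding", "manufacturing", "cad", "drafting"] ++ ["art", "drawing", "painting", "ceramics", "photography", "graphic"])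
      (by decide) (by simp only [List.any_append, h1, h2, h3, Bool.or_self])
      (pv_row_any h4 (by decide)) (by decide)).symm
  simp only [Bool.not_eq_true] at h4
  simp only [h4, Bool.false_eq_true, if_false]
  by_cases h5 : (["english", "literature", "writing", "journalism", "speech"].any fun word => PySem.Str.isIn word (PySem.Str.lower class_name)) = true
  · simp only [h5, if_true]
    exact (pvG (PySem.Str.lower class_name) 23 28 "English"
      (["agriculture", "agri", "animal", "plant", "food", "natural"] ++ ["carpentry", "wood", "welding", "manufacturing", "cad", "drafting"] ++ ["art", "drawing", "painting", "ceramics", "photography", "graphic"] ++ ["business", "marketing", "accounting", "entrepreneurship", "finance"])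
      (by decide) (by simp only [List.any_append, h1, h2, h3, h4, Bool.or_self])
      (pv_row_any h5 (by decide)) (by decide)).symm
  simp only [Bool.not_eq_true] at h5
  simp only [h5, Bool.false_eq_true, if_false]
  by_cases h6 : (["algebra", "geometry", "calculus", "statistics", "math"].any fun word => PySem.Str.isIn word (PySem.Str.lower class_name)) = true
  · simp only [h6, if_true]
    exact (pvG (PySem.Str.lower class_name) 28 33 "Math"
      (["agriculture", "agri", "animal", "plant", "food", "natural"] ++ ["carpentry", "wood", "welding", "manufacturing", "cad", "drafting"] ++ ["art", "drawing", "painting", "ceramics", "photography", "graphic"] ++ ["business", "marketing", "accounting", "entrepreneurship", "finance"] ++ ["english", "literature", "writing", "journalism", "speech"])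
      (by decide) (by simp only [List.any_append, h1, h2, h3, h4, h5, Bool.or_self])
      (pv_row_any h6 (by decide)) (by decide)).symm
  simp only [Bool.not_eq_true] at h6
  simp only [h6, Bool.false_eq_true, if_false]
  by_cases h7 : (["biology", "chemistry", "physics", "science"].any fun word => PySem.Str.isIn word (PySem.Str.lower class_name)) = true
  · simp only [h7, if_true]
    exact (pvG (PySem.Str.lower class_name) 33 37 "Science"
      (["agriculture", "agri", "animal", "plant", "food", "natural"] ++ ["carpentry", "wood", "welding", "manufacturing", "cad", "drafting"] ++ ["art", "drawing", "painting", "ceramics", "photography", "graphic"] ++ ["business", "marketing", "accounting", "entrepreneurship", "finance"] ++ ["english", "literature", "writing", "journalism", "speech"] ++ ["algebra", "geometry", "calculus", "statistics", "math"])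
      (by decide) (by simp only [List.any_append, h1, h2, h3, h4, h5, h6, Bool.or_self])
      (pv_row_any h7 (by decide)) (by decide)).symm
  simp only [Bool.not_eq_true] at h7
  simp only [h7, Bool.false_eq_true, if_false]
  by_cases h8 : (["history", "government", "psychology", "sociology", "economics"].any fun word => PySem.Str.isIn word (PySem.Str.lower class_name)) = true
  · simp only [h8, if_true]
    exact (pvG (PySem.Str.lower class_name) 37 42 "History"
      (["agriculture", "agri", "animal", "plant", "food", "natural"] ++ ["carpentry", "wood", "welding", "manufacturing", "cad", "drafting"] ++ ["art", "drawing", "painting", "ceramics", "photography", "graphic"] ++ ["business", "marketing", "accounting", "entrepreneurship", "finance"] ++ ["english", "literature", "writing", "journalism", "speech"] ++ ["algebra", "geometry", "calculus", "statistics", "math"] ++ ["biology", "chemistry", "physics", "science"])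
      (by decide) (by simp only [List.any_append, h1, h2, h3, h4, h5, h6, h7, Bool.or_self])
      (pv_row_any h8 (by decide)) (by decide)).symm
  simp only [Bool.not_eq_true] at h8
  simp only [h8, Bool.false_eq_true, if_false]
  by_cases h9 : (["band", "choir", "orchestra", "music"].any fun word => PySem.Str.isIn word (PySem.Str.lower class_name)) = true
  · simp only [h9, if_true]
    exact (pvG (PySem.Str.lower class_name) 42 46 "Music"
      (["agriculture", "agri", "animal", "plant", "food", "natural"] ++ ["carpentry", "wood", "welding", "manufacturing", "cad", "drafting"] ++ ["art", "drawing", "painting", "ceramics", "photography", "graphic"] ++ ["business", "marketing", "accounting", "entrepreneurship", "finance"] ++ ["english", "literature", "writing", "journalism", "speech"] ++ ["algebra", "geometry", "calculus", "statistics", "math"] ++ ["biology", "chemistry", "physics", "science"] ++ ["history", "government", "psychology", "sociology", "economics"])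
      (by decide) (by simp only [List.any_append, h1, h2, h3, h4, h5, h6, h7, h8, Bool.or_self])
      (pv_row_any h9 (by decide)) (by decide)).symm
  simp only [Bool.not_eq_true] at h9
  simp only [h9, Bool.false_eq_true, if_false]
  by_cases h10 : (["pe", "physical", "weights", "sports", "fitness"].any fun word => PySem.Str.isIn word (PySem.Str.lower class_name)) = true
  · simp only [h10, if_true]
    exact (pvG (PySem.Str.lower class_name) 46 51 "PE"
      (["agriculture", "agri", "animal", "plant", "food", "natural"] ++ ["carpentry", "wood", "welding", "manufacturing", "cad", "drafting"] ++ ["art", "drawing", "painting", "ceramics", "photography", "graphic"] ++ ["business", "marketing", "accounting", "entrepreneurship", "finance"] ++ ["english", "literature", "writing", "journalism", "speech"] ++ ["algebra", "geometry", "calculus", "statistics", "math"] ++ ["biology", "chemistry", "physics", "science"] ++ ["history", "government", "psychology", "sociology", "economics"] ++ ["band", "choir", "orchestra", "music"])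
      (by decide) (by simp only [List.any_append, h1, h2, h3, h4, h5, h6, h7, h8, h9, Bool.or_self])
      (pv_row_any h10 (by decide)) (by decide)).symm
  simp only [Bool.not_eq_true] at h10
  simp only [h10, Bool.false_eq_true, if_false]
  by_cases h11 : (["spanish", "french", "german", "language"].any fun word => PySem.Str.isIn word (PySem.Str.lower class_name)) = true
  · simp only [h11, if_true]
    exact (pvG (PySem.Str.lower class_name) 51 55 "World Languages"
      (["agriculture", "agri", "animal", "plant", "food", "natural"] ++ ["carpentry", "wood", "welding", "manufacturing", "cad", "drafting"] ++ ["art", "drawing", "painting", "ceramics", "photography", "graphic"] ++ ["business", "marketing", "accounting", "entrepreneurship", "finance"] ++ ["english", "literature", "writing", "journalism", "speech"] ++ ["algebra", "geometry", "calculus", "statistics", "math"] ++ ["biology", "chemistry", "physics", "science"] ++ ["history", "government", "psychology", "sociology", "economics"] ++ ["band", "choir", "orchestra", "music"] ++ ["pe", "physical", "weights", "sports", "fitness"])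
      (by decide) (by simp only [List.any_append, h1, h2, h3, h4, h5, h6, h7, h8, h9, h10, Bool.or_self])
      (pv_row_any h11 (by decide)) (by decide)).symm
  simp only [Bool.not_eq_true] at h11
  simp only [h11, Bool.false_eq_true, if_false]
  exact (pvGnone (PySem.Str.lower class_name)
    (["agriculture", "agri", "animal", "plant", "food", "natural"] ++ ["carpentry", "wood", "welding", "manufacturing", "cad", "drafting"] ++ ["art", "drawing", "painting", "ceramics", "photography", "graphic"] ++ ["business", "marketing", "accounting", "entrepreneurship", "finance"] ++ ["english", "literature", "writing", "journalism", "speech"] ++ ["algebra", "geometry", "calculus", "statistics", "math"] ++ ["biology", "chemistry", "physics", "science"] ++ ["history", "government", "psychology", "sociology", "economics"] ++ ["band", "choir", "orchestra", "music"] ++ ["pe", "physical", "weights", "sports", "fitness"] ++ ["spanish", "french", "german", "language"])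
    (by decide) (by simp only [List.any_append, h1, h2, h3, h4, h5, h6, h7, h8, h9, h10, h11, Bool.or_self])).symm
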